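-- pv_equiv track=rewrite | github.com/xfcold/ner-rnn-1 | code/preprocess.py | read_sentence
-- ===== SOURCE A (Python) =====
-- def read_sentence(sent):
-- 	tokens=[]
-- 	i=0
-- 	start=-1
-- 	size=0
-- 	while i<len(sent):
-- 		if sent[i]!=' ':
-- 			if size==0:
-- 				start=i
-- 			size=size+1
-- 		else:
-- 			if size!=0:
-- 				tokens.append(sent[start:start+size]+'$$$'+str(start)+'$$$'+str(start+size))
-- 				size=0
-- 		i=i+1
-- 	if size!=0:
-- 		tokens.append(sent[start:start+size]+'$$$'+str(start)+'$$$'+str(start+size))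
-- 	return tokens
-- ===== SOURCE B (Python) =====
-- import re
--
-- def read_sentence(sent):
--     tokens = []
--     for m in re.finditer(r'[^ ]+', sent):
--         tokens.append(m.group() + '$$$' + str(m.start()) + '$$$' + str(m.end()))
--     return tokens
-- ===== Notes on version B (the rewrite author's own statement) =====
-- stated objective: idiomatic
-- what changed: Replaces the manual char-by-char start/size state machine with regex-driven iteration over re.finditer(r'[^ ]+', sent), reading each token and its positions directly from the match object.
import Mathlib
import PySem

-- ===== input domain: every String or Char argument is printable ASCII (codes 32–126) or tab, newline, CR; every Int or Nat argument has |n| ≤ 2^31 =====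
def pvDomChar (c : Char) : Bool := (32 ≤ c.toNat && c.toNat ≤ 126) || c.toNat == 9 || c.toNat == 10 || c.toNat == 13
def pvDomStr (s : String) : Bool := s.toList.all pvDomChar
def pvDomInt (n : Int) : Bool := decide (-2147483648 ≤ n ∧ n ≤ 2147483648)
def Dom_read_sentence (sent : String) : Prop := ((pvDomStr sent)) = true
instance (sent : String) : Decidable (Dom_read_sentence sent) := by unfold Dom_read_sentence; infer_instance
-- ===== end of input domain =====

-- B replaces A's manual char-by-char start/size state machine with iteration over the
-- maximal runs of non-space characters (Python: re.finditer(r'[^ ]+', sent)); idiomatic, same cost.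

-- ===== PORT A =====
-- token built at positions [start, start+size): sent[start:start+size] + '$$$' + str(start) + '$$$' + str(start+size)
-- (Python string '+' done on the char lists, exact)
def mkTokA (cs : List Char) (start size : Int) : String :=
  String.ofList (PySem.List.slice cs (some start) (some (start + size)) ++
    "$$$".toList ++ (PySem.Int.toStr start).toList ++
    "$$$".toList ++ (PySem.Int.toStr (start + size)).toList)

-- the while loop of A: state (i, start, size, tokens), one step per character
def aLoop (cs : List Char) (rest : List Char) (i start size : Int)
    (tokens : List String) : List String :=
  match rest with
  | [] => if size ≠ 0 then tokens ++ [mkTokA cs start size] else tokens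
  | c :: r =>
    if c ≠ ' ' then
      aLoop cs r (i + 1) (if size = 0 then i else start) (size + 1) tokens
    else
      if size ≠ 0 then
        aLoop cs r (i + 1) start 0 (tokens ++ [mkTokA cs start size])
      else
        aLoop cs r (i + 1) start size tokens

def read_sentence (sent : String) : List String :=
  aLoop sent.toList sent.toList 0 (-1) 0 []

-- ===== PORT B =====
-- one iteration of re.finditer(r'[^ ]+'): skip a space, or consume a maximal non-space run
-- (run = m.group(), i = m.start(), i + run.length = m.end()); token string built on char lists, exact
def bLoop (rest : List Char) (i : Int) : List String :=
  match rest with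
  | [] => []
  | c :: r =>
    if c = ' ' then bLoop r (i + 1)
    else
      let run := (c :: r).takeWhile (· ≠ ' ')
      (String.ofList (run ++ "$$$".toList ++ (PySem.Int.toStr i).toList ++
        "$$$".toList ++ (PySem.Int.toStr (i + run.length)).toList)) ::
        bLoop ((c :: r).dropWhile (· ≠ ' ')) (i + run.length)
termination_by rest.length
decreasing_by
  · simp
  · simp only [List.dropWhile_cons]
    split
    · exact Nat.lt_succ_of_le (List.length_dropWhile_le _ _)
    · simp_all

def read_sentence_alt (sent : String) : List String :=
  bLoop sent.toList 0

-- ===== PRECONDITION & SPEC =====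
def Spec_read_sentence (sent : String) (out : List String) : Prop := out = read_sentence_alt sent
instance (sent : String) (out : List String) : Decidable (Spec_read_sentence sent out) := by unfold Spec_read_sentence; infer_instance

-- ===== CLAIM (what is proved, stated in full; the proofs are below) =====
def Claim_equal_read_sentence : Prop := ∀ (sent : String), Dom_read_sentence sent → Spec_read_sentence sent (read_sentence sent)

-- ===== LEMMAS AND PROOFS =====

theorem takeWhile_append_all {α : Type} (p : α → Bool) (w ys : List α)
    (h : ∀ x ∈ w, p x = true) :
    (w ++ ys).takeWhile p = w ++ ys.takeWhile p := by
  rw [List.takeWhile_append, List.takeWhile_eq_self_iff.2 h, if_pos rfl]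

theorem dropWhile_append_all {α : Type} (p : α → Bool) (w ys : List α)
    (h : ∀ x ∈ w, p x = true) :
    (w ++ ys).dropWhile p = ys.dropWhile p := by
  rw [List.dropWhile_append, List.dropWhile_eq_nil_iff.2 h]
  simp

-- A's loop on the empty suffix, mid-word: it flushes the pending word, and that word is
-- exactly B's (single) remaining token.
theorem aLoop_nil_mid (cs : List Char) (start size : Nat) (acc : List String)
    (h1 : 0 < size) (h2 : start + size ≤ cs.length)
    (hd : cs.drop (start + size) = [])
    (hns : ∀ c ∈ (cs.drop start).take size, c ≠ ' ') :
    aLoop cs [] ((start + size : Nat) : Int) (start : Int) (size : Int) acc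
      = acc ++ bLoop (cs.drop start) (start : Int) := by
  have hle : cs.length ≤ start + size := List.drop_eq_nil_iff.mp hd
  have hlen : (cs.drop start).length = size := by
    simp [List.length_drop]; omega
  have hw : (cs.drop start).take size = cs.drop start :=
    List.take_of_length_le (le_of_eq hlen)
  have hall : ∀ c ∈ cs.drop start, (decide (c ≠ ' ')) = true := by
    intro c hcmem
    simp only [decide_eq_true_eq]
    exact hns c (by rw [hw]; exact hcmem)
  obtain ⟨d, t, hdt⟩ : ∃ d t, cs.drop start = d :: t := by
    cases h : cs.drop start with
    | nil => rw [h] at hlen; simp at hlen; omega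
    | cons d t => exact ⟨d, t, rfl⟩
  have hdns : ¬ d = ' ' := by
    have := hall d (by rw [hdt]; exact List.mem_cons_self)
    simpa using this
  have hrun : (d :: t).takeWhile (· ≠ ' ') = d :: t := by
    rw [List.takeWhile_eq_self_iff]
    intro x hx; exact hall x (by rw [hdt]; exact hx)
  have hdrop : (d :: t).dropWhile (· ≠ ' ') = [] := by
    rw [List.dropWhile_eq_nil_iff]
    intro x hx; exact hall x (by rw [hdt]; exact hx)
  rw [hdt, bLoop, if_neg hdns]
  simp only [hrun, hdrop, bLoop]
  have hlen' : (d :: t).length = size := by rw [← hdt]; exact hlen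
  simp only [aLoop, ne_eq]
  rw [if_pos (show ((size : Nat) : Int) ≠ 0 by omega)]
  unfold mkTokA
  rw [PySem.List.slice_natCast_add, hw, hdt, hlen']

theorem aLoop_bLoop (cs : List Char) :
    ∀ (n : Nat) (rest : List Char), rest.length ≤ n →
      ((∀ (i : Nat) (start : Int) (acc : List String), cs.drop i = rest →
          aLoop cs rest (i : Int) start 0 acc = acc ++ bLoop rest (i : Int)) ∧
       (∀ (start size : Nat) (acc : List String), 0 < size → start + size ≤ cs.length →
          cs.drop (start + size) = rest →
          (∀ c ∈ (cs.drop start).take size, c ≠ ' ') →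
          aLoop cs rest ((start + size : Nat) : Int) (start : Int) (size : Int) acc
            = acc ++ bLoop (cs.drop start) (start : Int))) := by
  intro n
  induction n with
  | zero =>
    intro rest hlen
    have hr : rest = [] := List.eq_nil_of_length_eq_zero (Nat.le_zero.mp hlen)
    subst hr
    constructor
    · intro i start acc _
      simp [aLoop, bLoop]
    · intro start size acc h1 h2 hd hns
      exact aLoop_nil_mid cs start size acc h1 h2 hd hns
  | succ n ih =>
    intro rest hlen
    match rest with
    | [] =>
      constructor
      · intro i start acc _
        simp [aLoop, bLoop]
      · intro start size acc h1 h2 hd hns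
        exact aLoop_nil_mid cs start size acc h1 h2 hd hns
    | c :: r =>
      have hr : r.length ≤ n := by simp at hlen; omega
      constructor
      · intro i start acc hd
        have hd' : cs.drop (i + 1) = r := by rw [← List.tail_drop, hd]; rfl
        by_cases hc : c = ' '
        · subst hc
          have e1 : aLoop cs (' ' :: r) (i : Int) start 0 acc
              = aLoop cs r ((i : Int) + 1) start 0 acc := by
            simp [aLoop]
          have e2 : bLoop (' ' :: r) (i : Int) = bLoop r ((i : Int) + 1) := by
            rw [bLoop]; simp
          rw [e1, e2]
          have h := (ih r hr).1 (i + 1) start acc hd'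
          push_cast at h
          exact h
        · have hlt : i < cs.length := by
            have := congrArg List.length hd
            simp [List.length_drop] at this
            omega
          have htake : (cs.drop i).take 1 = [c] := by rw [hd]; rfl
          have h2 := (ih r hr).2 i 1 acc (by omega) (by omega) (by simpa using hd')
            (by rw [htake]; simpa using hc)
          have e1 : aLoop cs (c :: r) (i : Int) start 0 acc
              = aLoop cs r ((i : Int) + 1) (i : Int) 1 acc := by
            simp [aLoop, hc]
          rw [e1, ← hd]
          push_cast at h2
          exact h2
      · intro start size acc h1 h2 hd hns
        have hlt : start + size < cs.length := by
          have := congrArg List.length hd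
          simp [List.length_drop] at this
          omega
        have hd' : cs.drop (start + size + 1) = r := by rw [← List.tail_drop, hd]; rfl
        have hddrop : (cs.drop start).drop size = c :: r := by
          rw [List.drop_drop, hd]
        set w := (cs.drop start).take size with hwdef
        have hsplit : cs.drop start = w ++ (c :: r) := by
          conv_lhs => rw [← List.take_append_drop size (cs.drop start)]
          rw [hddrop]
        have hwlen : w.length = size := by
          rw [hwdef, List.length_take]
          simp [List.length_drop]
          omega
        have hwall : ∀ x ∈ w, (decide (x ≠ ' ')) = true := by
          intro x hx
          simp only [decide_eq_true_eq]
          exact hns x hx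
        by_cases hc : c = ' '
        · subst hc
          have e1 : aLoop cs (' ' :: r) ((start + size : Nat) : Int) (start : Int) (size : Int) acc
              = aLoop cs r (((start + size : Nat) : Int) + 1) (start : Int) 0
                  (acc ++ [mkTokA cs (start : Int) (size : Int)]) := by
            simp [aLoop, show ¬size = 0 by omega]
          have hP1 := (ih r hr).1 (start + size + 1) (start : Int)
            (acc ++ [mkTokA cs (start : Int) (size : Int)]) hd'
          obtain ⟨d, t, hdt⟩ : ∃ d t, w = d :: t := by
            cases hww : w with
            | nil => rw [hww] at hwlen; simp at hwlen; omega
            | cons d t => exact ⟨d, t, rfl⟩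
          have hdns : ¬ d = ' ' := by
            have := hwall d (by rw [hdt]; exact List.mem_cons_self)
            simpa using this
          have hcons : cs.drop start = d :: (t ++ (' ' :: r)) := by
            rw [hsplit, hdt]; rfl
          have hrun : (d :: (t ++ (' ' :: r))).takeWhile (· ≠ ' ') = w := by
            rw [show d :: (t ++ (' ' :: r)) = w ++ (' ' :: r) from by rw [hdt]; rfl]
            rw [takeWhile_append_all _ _ _ hwall]
            simp
          have hdw : (d :: (t ++ (' ' :: r))).dropWhile (· ≠ ' ') = ' ' :: r := by
            rw [show d :: (t ++ (' ' :: r)) = w ++ (' ' :: r) from by rw [hdt]; rfl]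
            rw [dropWhile_append_all _ _ _ hwall]
            simp
          have e2 : bLoop (cs.drop start) (start : Int)
              = (String.ofList (w ++ "$$$".toList ++ (PySem.Int.toStr (start : Int)).toList ++
                  "$$$".toList ++
                  (PySem.Int.toStr ((start : Int) + ((size : Nat) : Int))).toList)) ::
                bLoop r (((start + size : Nat) : Int) + 1) := by
            rw [hcons, bLoop, if_neg hdns]
            simp only [hrun, hdw, hwlen]
            rw [bLoop]
            simp only [if_pos]
            push_cast
            ring_nf
          have etok : mkTokA cs (start : Int) (size : Int)
              = String.ofList (w ++ "$$$".toList ++ (PySem.Int.toStr (start : Int)).toList ++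
                  "$$$".toList ++
                  (PySem.Int.toStr ((start : Int) + ((size : Nat) : Int))).toList) := by
            unfold mkTokA
            rw [PySem.List.slice_natCast_add]
          rw [e1]
          push_cast at hP1 e2 ⊢
          rw [hP1, e2, etok]
          simp
        · have hns' : ∀ x ∈ (cs.drop start).take (size + 1), x ≠ ' ' := by
            intro x hx
            rw [List.take_add_one] at hx
            have hget : (cs.drop start)[size]? = some c := by
              rw [← List.head?_drop, hddrop]; rfl
            rcases List.mem_append.mp hx with h | h
            · exact hns x h
            · rw [hget] at h
              simp at h
              subst h
              exact hc
          have h2' := (ih r hr).2 start (size + 1) acc (by omega) (by omega)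
            (by rw [← Nat.add_assoc]; exact hd') hns'
          have e1 : aLoop cs (c :: r) ((start + size : Nat) : Int) (start : Int) (size : Int) acc
              = aLoop cs r (((start + size : Nat) : Int) + 1) (start : Int)
                  ((size : Int) + 1) acc := by
            simp [aLoop, hc, show ¬size = 0 by omega]
          rw [e1]
          push_cast at h2' ⊢
          exact h2'

theorem read_sentence_spec : Claim_equal_read_sentence := by
  intro sent _
  unfold Spec_read_sentence read_sentence read_sentence_alt
  have h := (aLoop_bLoop sent.toList sent.toList.length sent.toList le_rfl).1 0 (-1) [] rfl
  simpa using h
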